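-- pv_equiv track=rewrite | github.com/baddam05/pythonprograms | longest_k_interspace.py | longest_k_interspace_substring
-- ===== SOURCE A (Python) =====
-- def longest_k_interspace_substring(word, k):
--     max_length = 0
--     longest_substring = ""
--
--     for i in range(len(word)):
--         for j in range(i, len(word)):
--             substring = word[i:j + 1]
--             if max(ord(c) for c in substring) - min(ord(c) for c in substring) <= k:
--                 if len(substring) > max_length:
--                     max_length = len(substring)
--                     longest_substring = substring
--             else:
--                 break
--
--     return longest_substring
-- ===== SOURCE B (Python) =====
-- def longest_k_interspace_substring(word, k):
--     if k < 0:
--         return ""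
--     n = len(word)
--     best_start = 0
--     best_len = 0
--     i = 0
--     while i < n:
--         hi = lo = ord(word[i])
--         j = i + 1
--         while j < n:
--             c = ord(word[j])
--             if max(hi, c) - min(lo, c) > k:
--                 break
--             hi = max(hi, c)
--             lo = min(lo, c)
--             j += 1
--         if j - i > best_len:
--             best_start = i
--             best_len = j - i
--         i += 1
--     return word[best_start:best_start + best_len]
-- ===== Notes on version B (the rewrite author's own statement) =====
-- stated objective: faster
-- what changed: Instead of re-slicing and rescanning each substring for its max/min ord (A's inner generator passes), B makes one forward scan per start carrying running max/min and keeps the best window as (start, length), slicing the word once at the end.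
import Mathlib
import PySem

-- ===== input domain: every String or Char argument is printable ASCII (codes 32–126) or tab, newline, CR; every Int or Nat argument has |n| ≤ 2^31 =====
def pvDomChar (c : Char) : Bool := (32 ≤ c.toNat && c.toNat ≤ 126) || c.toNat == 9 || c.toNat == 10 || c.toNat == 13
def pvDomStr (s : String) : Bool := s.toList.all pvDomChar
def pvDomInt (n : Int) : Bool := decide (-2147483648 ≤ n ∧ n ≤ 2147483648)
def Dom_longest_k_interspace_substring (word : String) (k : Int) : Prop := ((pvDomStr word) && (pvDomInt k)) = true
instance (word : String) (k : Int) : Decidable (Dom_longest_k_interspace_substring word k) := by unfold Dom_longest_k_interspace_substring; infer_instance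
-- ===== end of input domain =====

-- B replaces A's per-substring max/min generator rescans by one forward scan per start
-- carrying running max/min, keeping the best window as (start, length); objective: faster.

-- ===== PORT A =====

-- word[i:j] for 0 ≤ i ≤ j (all slices both programs take): Python slice with nonnegative
-- in-order bounds, exact here (take clamps at the end like Python).
def subSlice (cs : List Char) (i j : Nat) : List Char := (cs.drop i).take (j - i)

-- max(ord(c) for c in l); the [] case is unreachable in A (its substrings are nonempty).
def maxOrd : List Char → Int
  | [] => 0
  | c :: rest => rest.foldl (fun m d => max m ((d.toNat : Int))) ((c.toNat : Int))

-- min(ord(c) for c in l); the [] case is unreachable in A.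
def minOrd : List Char → Int
  | [] => 0
  | c :: rest => rest.foldl (fun m d => min m ((d.toNat : Int))) ((c.toNat : Int))

-- A's inner 'for j in range(i, len(word))' with its break, over the list of j values;
-- state = (max_length, longest_substring)
def innerA (cs : List Char) (k : Int) (i : Nat) : List Nat → Nat × List Char → Nat × List Char
  | [], st => st
  | j :: js, st =>
    let sub := subSlice cs i (j + 1)
    if maxOrd sub - minOrd sub ≤ k then
      innerA cs k i js (if sub.length > st.1 then (sub.length, sub) else st)
    else st

def longest_k_interspace_substring (word : String) (k : Int) : String :=
  let cs := word.toList
  let st := (List.range cs.length).foldl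
    (fun st i => innerA cs k i (List.range' i (cs.length - i)) st) (0, [])
  String.mk st.2

-- ===== PORT B =====

-- B's inner 'while j < n' extending the window while its spread stays ≤ k, carrying
-- running hi/lo; fuel bounds the loop (any fuel ≥ n - j runs it to its break/exit)
def scanB (cs : List Char) (k : Int) : Nat → Int → Int → Nat → Nat
  | 0, _, _, j => j
  | fuel + 1, hi, lo, j =>
    if h : j < cs.length then
      let c : Int := ((cs[j]'h).toNat : Int)
      if max hi c - min lo c > k then j
      else scanB cs k fuel (max hi c) (min lo c) (j + 1)
    else j

-- B's outer 'while i < n' over start positions, keeping the best (start, length)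
def outerB (cs : List Char) (k : Int) : Nat → Nat → Nat → Nat → Nat × Nat
  | 0, _, bs, bl => (bs, bl)
  | fuel + 1, i, bs, bl =>
    if h : i < cs.length then
      let c : Int := ((cs[i]'h).toNat : Int)
      let j := scanB cs k cs.length c c (i + 1)
      if j - i > bl then outerB cs k fuel (i + 1) i (j - i)
      else outerB cs k fuel (i + 1) bs bl
    else (bs, bl)

def longest_k_interspace_substring_alt (word : String) (k : Int) : String :=
  if k < 0 then "" else
    let cs := word.toList
    let p := outerB cs k cs.length 0 0 0
    String.mk (subSlice cs p.1 (p.1 + p.2))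

-- ===== PRECONDITION & SPEC =====
def Spec_longest_k_interspace_substring (word : String) (k : Int) (out : String) : Prop := out = longest_k_interspace_substring_alt word k
instance (word : String) (k : Int) (out : String) : Decidable (Spec_longest_k_interspace_substring word k out) := by unfold Spec_longest_k_interspace_substring; infer_instance

-- ===== CLAIM (what is proved, stated in full; the proofs are below) =====
def Claim_equal_longest_k_interspace_substring : Prop := ∀ (word : String) (k : Int), Dom_longest_k_interspace_substring word k → Spec_longest_k_interspace_substring word k (longest_k_interspace_substring word k)

-- ===== LEMMAS AND PROOFS =====

-- the end of the maximal valid extension from start i, phrased with A's recomputed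
-- spreads; fuel-indexed (used with fuel = cs.length - j)
def Fend (cs : List Char) (k : Int) (i : Nat) : Nat → Nat → Nat
  | 0, j => j
  | m + 1, j =>
    if maxOrd (subSlice cs i (j + 1)) - minOrd (subSlice cs i (j + 1)) ≤ k then
      Fend cs k i m (j + 1)
    else j

theorem Fend_ge (cs : List Char) (k : Int) (i : Nat) :
    ∀ m j, j ≤ Fend cs k i m j := by
  intro m
  induction m with
  | zero => intro j; exact le_refl j
  | succ m ih =>
    intro j
    show j ≤ (if _ ≤ k then Fend cs k i m (j + 1) else j)
    split
    · exact le_trans (Nat.le_succ j) (ih (j + 1))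
    · exact le_refl j

theorem subSlice_length (cs : List Char) (i j : Nat) :
    (subSlice cs i j).length = min (j - i) (cs.length - i) := by
  simp [subSlice]

theorem subSlice_nil (cs : List Char) (i : Nat) : subSlice cs i i = [] := by
  simp [subSlice]

theorem subSlice_snoc (cs : List Char) (i j : Nat) (hij : i ≤ j) (h : j < cs.length) :
    subSlice cs i (j + 1) = subSlice cs i j ++ [cs[j]'h] := by
  unfold subSlice
  have h1 : j + 1 - i = (j - i) + 1 := by omega
  rw [h1, List.take_add_one]
  have h2 : j - i < (cs.drop i).length := by simp; omega
  simp [List.getElem?_eq_getElem h2]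
  congr 1
  · omega

theorem subSlice_singleton (cs : List Char) (i : Nat) (h : i < cs.length) :
    subSlice cs i (i + 1) = [cs[i]'h] := by
  rw [subSlice_snoc cs i i (le_refl i) h, subSlice_nil]
  simp

theorem maxOrd_snoc (l : List Char) (c : Char) (h : l ≠ []) :
    maxOrd (l ++ [c]) = max (maxOrd l) ((c.toNat : Int)) := by
  cases l with
  | nil => exact absurd rfl h
  | cons a rest => simp [maxOrd, List.foldl_append]

theorem minOrd_snoc (l : List Char) (c : Char) (h : l ≠ []) :
    minOrd (l ++ [c]) = min (minOrd l) ((c.toNat : Int)) := by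
  cases l with
  | nil => exact absurd rfl h
  | cons a rest => simp [minOrd, List.foldl_append]

theorem maxOrd_singleton (c : Char) : maxOrd [c] = (c.toNat : Int) := by simp [maxOrd]
theorem minOrd_singleton (c : Char) : minOrd [c] = (c.toNat : Int) := by simp [minOrd]

-- A's inner loop computes: update iff the maximal extension beats the current best
theorem innerA_eq (cs : List Char) (k : Int) (i : Nat) :
    ∀ m j ml sub, i ≤ j → j - i ≤ ml → j + m = cs.length →
      innerA cs k i (List.range' j m) (ml, sub) =
        if Fend cs k i m j - i > ml then
          (Fend cs k i m j - i, subSlice cs i (Fend cs k i m j))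
        else (ml, sub) := by
  intro m
  induction m with
  | zero =>
    intro j ml sub hij hml _
    show (ml, sub) = if j - i > ml then _ else (ml, sub)
    rw [if_neg (show ¬ j - i > ml by omega)]
  | succ m ih =>
    intro j ml sub hij hml hn
    rw [List.range'_succ, innerA]
    show (if maxOrd (subSlice cs i (j + 1)) - minOrd (subSlice cs i (j + 1)) ≤ k then _ else _) = _
    by_cases hc : maxOrd (subSlice cs i (j + 1)) - minOrd (subSlice cs i (j + 1)) ≤ k
    · rw [if_pos hc]
      have hFe : Fend cs k i (m + 1) j = Fend cs k i m (j + 1) := by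
        show (if _ ≤ k then _ else j) = _
        rw [if_pos hc]
      rw [hFe]
      have hlen : (subSlice cs i (j + 1)).length = j + 1 - i := by
        rw [subSlice_length]; omega
      have hge : j + 1 ≤ Fend cs k i m (j + 1) := Fend_ge cs k i m (j + 1)
      by_cases hupd : (subSlice cs i (j + 1)).length > ml
      · rw [if_pos hupd]
        rw [ih (j + 1) (subSlice cs i (j + 1)).length (subSlice cs i (j + 1))
            (by omega) (by omega) (by omega)]
        rw [hlen]
        by_cases hF : Fend cs k i m (j + 1) - i > j + 1 - i
        · rw [if_pos hF, if_pos (show Fend cs k i m (j + 1) - i > ml by omega)]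
        · have hFe2 : Fend cs k i m (j + 1) = j + 1 := by omega
          rw [if_neg hF, if_pos (show Fend cs k i m (j + 1) - i > ml by omega), hFe2]
      · rw [if_neg hupd]
        exact ih (j + 1) ml sub (by omega) (by omega) (by omega)
    · rw [if_neg hc]
      have hFe : Fend cs k i (m + 1) j = j := by
        show (if _ ≤ k then _ else j) = j
        rw [if_neg hc]
      rw [hFe, if_neg (show ¬ j - i > ml by omega)]

-- B's running-max/min scan reaches exactly the end A's recomputed spreads reach
theorem scanB_eq (cs : List Char) (k : Int) (i : Nat) :
    ∀ m j hi lo, i < j → j ≤ cs.length → cs.length - j ≤ m →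
      hi = maxOrd (subSlice cs i j) → lo = minOrd (subSlice cs i j) →
      scanB cs k m hi lo j = Fend cs k i (cs.length - j) j := by
  intro m
  induction m with
  | zero =>
    intro j hi lo hij hjn hm _ _
    have hj : cs.length - j = 0 := by omega
    rw [hj]
    rfl
  | succ m ih =>
    intro j hi lo hij hjn hm hhi hlo
    rw [scanB]
    by_cases h : j < cs.length
    · simp only [h, dite_true]
      have hne : subSlice cs i j ≠ [] := by
        have := subSlice_length cs i j
        intro hnil
        rw [hnil] at this
        simp at this
        omega
      have hsnoc := subSlice_snoc cs i j (by omega) h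
      have hmax : maxOrd (subSlice cs i (j + 1)) = max (maxOrd (subSlice cs i j)) (((cs[j]'h).toNat : Int)) := by
        rw [hsnoc, maxOrd_snoc _ _ hne]
      have hmin : minOrd (subSlice cs i (j + 1)) = min (minOrd (subSlice cs i j)) (((cs[j]'h).toNat : Int)) := by
        rw [hsnoc, minOrd_snoc _ _ hne]
      have hnj : cs.length - j = (cs.length - (j + 1)) + 1 := by omega
      rw [hnj]
      by_cases hc : maxOrd (subSlice cs i (j + 1)) - minOrd (subSlice cs i (j + 1)) ≤ k
      · have hc' : ¬ (max hi ((cs[j]'h).toNat : Int) - min lo ((cs[j]'h).toNat : Int) > k) := by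
          rw [hhi, hlo, ← hmax, ← hmin]; omega
        rw [if_neg hc']
        have hFe : Fend cs k i ((cs.length - (j + 1)) + 1) j = Fend cs k i (cs.length - (j + 1)) (j + 1) := by
          show (if _ ≤ k then _ else j) = _
          rw [if_pos hc]
        rw [hFe]
        exact ih (j + 1) _ _ (by omega) (by omega) (by omega)
          (by rw [hhi, ← hmax]) (by rw [hlo, ← hmin])
      · have hc' : max hi ((cs[j]'h).toNat : Int) - min lo ((cs[j]'h).toNat : Int) > k := by
          rw [hhi, hlo, ← hmax, ← hmin]; omega
        rw [if_pos hc']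
        have hFe : Fend cs k i ((cs.length - (j + 1)) + 1) j = j := by
          show (if _ ≤ k then _ else j) = j
          rw [if_neg hc]
        rw [hFe]
    · simp only [h, dite_false]
      have hj : cs.length - j = 0 := by omega
      rw [hj]
      rfl

-- A's outer fold over the remaining starts equals B's outer recursion (k ≥ 0)
theorem outer_eq (cs : List Char) (k : Int) (hk : 0 ≤ k) :
    ∀ m i bs ml, cs.length - i ≤ m →
      (List.range' i (cs.length - i)).foldl
          (fun st x => innerA cs k x (List.range' x (cs.length - x)) st)
          (ml, subSlice cs bs (bs + ml)) =
        ((outerB cs k m i bs ml).2, subSlice cs (outerB cs k m i bs ml).1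
            ((outerB cs k m i bs ml).1 + (outerB cs k m i bs ml).2)) := by
  intro m
  induction m with
  | zero =>
    intro i bs ml hm
    have h0 : cs.length - i = 0 := by omega
    rw [h0]
    rfl
  | succ m ih =>
    intro i bs ml hm
    rw [outerB]
    by_cases h : i < cs.length
    · simp only [h, dite_true]
      have hrange : cs.length - i = (cs.length - (i + 1)) + 1 := by omega
      rw [hrange, List.range'_succ, List.foldl_cons]
      have hj : scanB cs k cs.length ((cs[i]'h).toNat : Int) ((cs[i]'h).toNat : Int) (i + 1)
          = Fend cs k i (cs.length - (i + 1)) (i + 1) := by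
        apply scanB_eq cs k i cs.length (i + 1) _ _ (by omega) (by omega) (by omega)
        · rw [subSlice_singleton cs i h, maxOrd_singleton]
        · rw [subSlice_singleton cs i h, minOrd_singleton]
      rw [hrange, innerA_eq cs k i ((cs.length - (i + 1)) + 1) i ml
          (subSlice cs bs (bs + ml)) (le_refl i) (by omega) (by omega)]
      have hFi : Fend cs k i ((cs.length - (i + 1)) + 1) i = Fend cs k i (cs.length - (i + 1)) (i + 1) := by
        show (if _ ≤ k then _ else i) = _
        rw [if_pos (by rw [subSlice_singleton cs i h, maxOrd_singleton, minOrd_singleton]; omega)]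
      rw [hFi, hj]
      have hge : i + 1 ≤ Fend cs k i (cs.length - (i + 1)) (i + 1) :=
        Fend_ge cs k i (cs.length - (i + 1)) (i + 1)
      by_cases hupd : Fend cs k i (cs.length - (i + 1)) (i + 1) - i > ml
      · rw [if_pos hupd, if_pos hupd]
        have ihx := ih (i + 1) i (Fend cs k i (cs.length - (i + 1)) (i + 1) - i) (by omega)
        have hi2 : i + (Fend cs k i (cs.length - (i + 1)) (i + 1) - i)
            = Fend cs k i (cs.length - (i + 1)) (i + 1) := by omega
        rw [hi2] at ihx
        exact ihx
      · rw [if_neg hupd, if_neg hupd]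
        exact ih (i + 1) bs ml (by omega)
    · simp only [h, dite_false]
      have h0 : cs.length - i = 0 := by omega
      rw [h0]
      rfl

-- with k < 0 no substring is valid: A's inner loop never changes the state
theorem innerA_const (cs : List Char) (k : Int) (hk : k < 0) (i : Nat) (st : Nat × List Char) :
    innerA cs k i (List.range' i (cs.length - i)) st = st := by
  obtain ⟨ml, sub⟩ := st
  by_cases hi : i ≤ cs.length
  case neg =>
    have h0 : cs.length - i = 0 := by omega
    rw [h0]
    rfl
  rw [innerA_eq cs k i (cs.length - i) i ml sub (le_refl i) (by omega) (by omega)]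
  have hFe : Fend cs k i (cs.length - i) i = i := by
    cases hni : cs.length - i with
    | zero => rfl
    | succ m =>
      have h : i < cs.length := by omega
      show (if _ ≤ k then _ else i) = i
      rw [if_neg (by rw [subSlice_singleton cs i h, maxOrd_singleton, minOrd_singleton]; omega)]
  rw [hFe, if_neg (show ¬ i - i > ml by omega)]

theorem foldl_const (cs : List Char) (k : Int) (hk : k < 0) :
    ∀ (l : List Nat) (st : Nat × List Char),
      l.foldl (fun st x => innerA cs k x (List.range' x (cs.length - x)) st) st = st := by
  intro l
  induction l with
  | nil => intro st; rfl
  | cons a t ih => intro st; rw [List.foldl_cons, innerA_const cs k hk a st]; exact ih st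

-- ===== VERDICT (by name: the statement is the Claim_ definition above) =====
theorem longest_k_interspace_substring_spec : Claim_equal_longest_k_interspace_substring := by
  unfold Claim_equal_longest_k_interspace_substring
  intro word k _
  unfold Spec_longest_k_interspace_substring
  unfold longest_k_interspace_substring longest_k_interspace_substring_alt
  by_cases hk : k < 0
  · simp only [hk, if_true]
    rw [foldl_const word.toList k hk]
    rfl
  · simp only [hk, if_false]
    have h0 : (0, ([] : List Char)) = ((0 : Nat), subSlice word.toList 0 (0 + 0)) := by
      rw [subSlice_nil]
    rw [List.range_eq_range']
    have hmain := outer_eq word.toList k (by omega) word.toList.length 0 0 0 (by omega)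
    simp only [Nat.sub_zero] at hmain
    rw [h0, hmain]
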